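-- pv_equiv track=rewrite | github.com/jacobcy/vibe-coding-control-center | src/vibe3/utils/codeagent_helpers.py | sanitize_task_shell_meta
-- ===== SOURCE A (Python) =====
-- def sanitize_task_shell_meta(task: str) -> str:
--     """Replace shell glob meta characters with safe equivalents."""
--     replacements = {
--         "*": "×",
--         "?": "？",
--         "[": "【",
--         "]": "】",
--         "{": "｛",
--         "}": "｝",
--     }
--     result = task
--     for meta, safe in replacements.items():
--         result = result.replace(meta, safe)
--     return result
-- ===== SOURCE B (Python) =====
-- def sanitize_task_shell_meta(task: str) -> str:
--     """Replace shell glob meta characters with safe equivalents."""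
--     replacements = {
--         "*": "×",
--         "?": "？",
--         "[": "【",
--         "]": "】",
--         "{": "｛",
--         "}": "｝",
--     }
--     return "".join(replacements.get(c, c) for c in task)
-- ===== Notes on version B (the rewrite author's own statement) =====
-- stated objective: idiomatic
-- what changed: B makes a single character-by-character pass over the input, emitting each character's mapped (or identity) value via one dict lookup and joining, instead of A's six sequential full-string replace passes (one per replacement pair).
import Mathlib
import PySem

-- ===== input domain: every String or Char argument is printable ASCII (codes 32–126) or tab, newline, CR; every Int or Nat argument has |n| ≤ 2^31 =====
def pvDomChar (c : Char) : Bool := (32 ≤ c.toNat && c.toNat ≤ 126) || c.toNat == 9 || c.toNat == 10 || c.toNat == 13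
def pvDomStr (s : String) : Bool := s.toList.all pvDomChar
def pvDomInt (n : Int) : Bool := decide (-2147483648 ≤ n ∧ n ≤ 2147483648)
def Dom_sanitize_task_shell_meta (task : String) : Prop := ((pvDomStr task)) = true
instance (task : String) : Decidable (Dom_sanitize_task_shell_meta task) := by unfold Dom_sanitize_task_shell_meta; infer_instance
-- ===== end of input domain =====

-- B replaces A's six sequential full-string replace passes by ONE pass over the
-- characters, each mapped through the replacements dict (idiomatic; same cost class).

-- ===== PORT A =====
-- A: result = task; then one str.replace per (meta, safe) pair in dict insertion order.
def sanitize_task_shell_meta (task : String) : String :=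
  let r1 := PySem.Str.replace task "*" "×"
  let r2 := PySem.Str.replace r1 "?" "？"
  let r3 := PySem.Str.replace r2 "[" "【"
  let r4 := PySem.Str.replace r3 "]" "】"
  let r5 := PySem.Str.replace r4 "{" "｛"
  let r6 := PySem.Str.replace r5 "}" "｝"
  r6

-- ===== PORT B =====
-- B: the same replacements dict, used as a per-character lookup table; one pass + join.
def pvReplacements : PySem.Dict String String :=
  PySem.Dict.mk [("*", "×"), ("?", "？"), ("[", "【"), ("]", "】"), ("{", "｛"), ("}", "｝")]

def sanitize_task_shell_meta_alt (task : String) : String :=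
  PySem.Str.join ""
    (task.toList.map (fun c =>
      pvReplacements.getD (String.ofList [c]) (String.ofList [c])))

-- ===== PRECONDITION & SPEC =====
def Spec_sanitize_task_shell_meta (task : String) (out : String) : Prop := out = sanitize_task_shell_meta_alt task
instance (task : String) (out : String) : Decidable (Spec_sanitize_task_shell_meta task out) := by unfold Spec_sanitize_task_shell_meta; infer_instance

-- ===== CLAIM (what is proved, stated in full; the proofs are below) =====
def Claim_equal_sanitize_task_shell_meta : Prop := ∀ (task : String), Dom_sanitize_task_shell_meta task → Spec_sanitize_task_shell_meta task (sanitize_task_shell_meta task)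

-- ===== LEMMAS AND PROOFS =====

-- the per-character substitution both programs realise
def pvSub (o n c : Char) : Char := if c = o then n else c

def pvF (c : Char) : Char :=
  pvSub '}' '｝' (pvSub '{' '｛' (pvSub ']' '】' (pvSub '[' '【' (pvSub '?' '？' (pvSub '*' '×' c)))))

lemma go_single (o n : Char) : ∀ (l acc : List Char),
    PySem.Chars.replace.go [o] [n] l.length l acc = acc.reverse ++ l.map (pvSub o n) := by
  intro l
  induction l with
  | nil => intro acc; simp [PySem.Chars.replace.go]
  | cons c t ih =>
    intro acc
    rw [show (c :: t).length = t.length + 1 from rfl, PySem.Chars.replace.go]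
    by_cases h : c = o
    · subst h
      simp [List.isPrefixOf, ih, pvSub]
    · simp only [List.isPrefixOf, beq_iff_eq, Bool.and_true]
      rw [if_neg (fun e => h e.symm)]
      simp [ih, pvSub, h]

lemma replace_single (o n : Char) (cs : List Char) :
    PySem.Chars.replace cs [o] [n] = cs.map (pvSub o n) := by
  simp [PySem.Chars.replace, go_single]

lemma getD_single (c : Char) :
    pvReplacements.getD (String.ofList [c]) (String.ofList [c]) = String.ofList [pvF c] := by
  by_cases h1 : c = '*'; · subst h1; decide
  by_cases h2 : c = '?'; · subst h2; decide
  by_cases h3 : c = '['; · subst h3; decide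
  by_cases h4 : c = ']'; · subst h4; decide
  by_cases h5 : c = '{'; · subst h5; decide
  by_cases h6 : c = '}'; · subst h6; decide
  have e1 : (("*" : String) == String.ofList [c]) = false := by
    simp [String.ext_iff]; exact fun e => h1 e.symm
  have e2 : (("?" : String) == String.ofList [c]) = false := by
    simp [String.ext_iff]; exact fun e => h2 e.symm
  have e3 : (("[" : String) == String.ofList [c]) = false := by
    simp [String.ext_iff]; exact fun e => h3 e.symm
  have e4 : (("]" : String) == String.ofList [c]) = false := by
    simp [String.ext_iff]; exact fun e => h4 e.symm
  have e5 : (("{" : String) == String.ofList [c]) = false := by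
    simp [String.ext_iff]; exact fun e => h5 e.symm
  have e6 : (("}" : String) == String.ofList [c]) = false := by
    simp [String.ext_iff]; exact fun e => h6 e.symm
  simp [pvReplacements, PySem.Dict.getD, PySem.Dict.get?, List.find?, pvF, pvSub,
    e1, e2, e3, e4, e5, e6, h1, h2, h3, h4, h5, h6]

-- ===== VERDICT (by name: the statement is the Claim_ definition above) =====
set_option maxHeartbeats 1000000 in
theorem sanitize_task_shell_meta_spec : Claim_equal_sanitize_task_shell_meta := by
  intro task _
  unfold Spec_sanitize_task_shell_meta sanitize_task_shell_meta sanitize_task_shell_meta_alt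
  simp only [PySem.Str.replace, PySem.Str.join, String.toList_ofList]
  simp only [show ("*":String).toList = ['*'] from rfl, show ("?":String).toList = ['?'] from rfl,
    show ("[":String).toList = ['['] from rfl, show ("]":String).toList = [']'] from rfl,
    show ("{":String).toList = ['{'] from rfl, show ("}":String).toList = ['}'] from rfl,
    show ("×":String).toList = ['×'] from rfl, show ("？":String).toList = ['？'] from rfl,
    show ("【":String).toList = ['【'] from rfl, show ("】":String).toList = ['】'] from rfl,
    show ("｛":String).toList = ['｛'] from rfl, show ("｝":String).toList = ['｝'] from rfl,
    show ("":String).toList = [] from rfl]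
  simp only [replace_single, List.map_map, getD_single]
  rw [show (String.toList ∘ fun c => String.ofList [pvF c]) = (fun c => [c]) ∘ pvF from
        funext (fun c => by simp)]
  rw [show List.map ((fun c => [c]) ∘ pvF) task.toList
        = List.map (fun c => [c]) (List.map pvF task.toList) from (List.map_map ..).symm]
  rw [PySem.Chars.join_nil_singletons]
  rfl
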